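-- pv_equiv track=rewrite | github.com/loevendallund/parakeet-net | compare.py | rem_nodes_from_nlist
-- ===== SOURCE A (Python) =====
-- import copy
-- from typing import Dict, List, Tuple, Union
--
-- def rem_nodes_from_nlist(list, nodes) -> List:
--     tmp = copy.deepcopy(list)
--     for i in range(len(list)):
--         for j in range(len(list[i])):
--             if list[i][j] in nodes:
--                 if list[i][j] in tmp[i]:
--                     tmp[i].remove(list[i][j])
--         if tmp[i] == []:
--             tmp.remove(tmp[i])
--             return rem_nodes_from_nlist(tmp, nodes)
--     return tmp
-- ===== SOURCE B (Python) =====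
-- def rem_nodes_from_nlist(list, nodes):
--     result = []
--     for sub in list:
--         filtered = [x for x in sub if x not in nodes]
--         if filtered:
--             result.append(filtered)
--     return result
-- ===== Notes on version B (the rewrite author's own statement) =====
-- stated objective: simpler
-- what changed: Replaces A's deepcopy + in-place element removal + recurse-and-restart-from-scratch whenever a sublist empties with a single forward pass that filters each sublist and appends it only if non-empty.
import Mathlib
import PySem

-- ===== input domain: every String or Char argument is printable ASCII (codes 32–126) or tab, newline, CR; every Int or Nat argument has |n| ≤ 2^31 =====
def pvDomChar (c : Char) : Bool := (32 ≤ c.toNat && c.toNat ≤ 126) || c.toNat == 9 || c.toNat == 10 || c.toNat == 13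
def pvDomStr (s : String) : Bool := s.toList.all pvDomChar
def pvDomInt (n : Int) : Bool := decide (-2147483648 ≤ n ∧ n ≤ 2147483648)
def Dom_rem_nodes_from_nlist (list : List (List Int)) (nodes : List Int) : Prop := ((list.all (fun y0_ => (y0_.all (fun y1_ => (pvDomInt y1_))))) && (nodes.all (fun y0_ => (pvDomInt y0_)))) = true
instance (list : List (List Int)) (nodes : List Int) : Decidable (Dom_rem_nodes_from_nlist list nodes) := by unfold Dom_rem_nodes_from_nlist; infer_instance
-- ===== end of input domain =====

-- B replaces A's deepcopy + in-place removal + restart-recursion-on-empty with one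
-- forward pass that filters each sublist and keeps it only if non-empty (objective: simpler).

-- ===== PORT A =====
-- inner loop: for j in range(len(list[i])): if list[i][j] in nodes and in tmp[i]: tmp[i].remove(list[i][j])
def pvA_inner (orig : List Int) (nodes : List Int) : List Int :=
  orig.foldl (fun tmpi x =>
    if x ∈ nodes ∧ x ∈ tmpi then (PySem.List.remove? tmpi x).getD tmpi else tmpi) orig

-- outer loop over i with the processed prefix `acc` of tmp; `.inr tmp'` signals the
-- 'tmp.remove(tmp[i]); return rem_nodes_from_nlist(tmp, nodes)' restart with the new tmp
def pvA_pass (nodes : List Int) : List (List Int) → List (List Int) → (List (List Int)) ⊕ (List (List Int))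
  | acc, [] => Sum.inl acc
  | acc, s :: rest =>
      let s' := pvA_inner s nodes
      if s' = [] then
        Sum.inr ((PySem.List.remove? (acc ++ s' :: rest) s').getD (acc ++ s' :: rest))
      else pvA_pass nodes (acc ++ [s']) rest

theorem pvA_pass_inr_length (nodes : List Int) :
    ∀ (rest acc t : List (List Int)), pvA_pass nodes acc rest = Sum.inr t →
      t.length + 1 = acc.length + rest.length := by
  intro rest
  induction rest with
  | nil => intro acc t h; simp [pvA_pass] at h
  | cons s rest ih =>
      intro acc t h
      simp only [pvA_pass] at h
      split at h
      · rename_i he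
        have hmem : pvA_inner s nodes ∈ acc ++ pvA_inner s nodes :: rest := by simp
        rw [PySem.List.remove?_eq_some_erase _ _ hmem] at h
        simp only [Option.getD_some] at h
        cases h
        have := List.length_erase_of_mem hmem
        simp at this ⊢
        omega
      · have := ih (acc ++ [pvA_inner s nodes]) t h
        simp at this ⊢
        omega

def rem_nodes_from_nlist (list : List (List Int)) (nodes : List Int) : List (List Int) :=
  match h : pvA_pass nodes [] list with
  | Sum.inl r => r
  | Sum.inr tmp' => rem_nodes_from_nlist tmp' nodes
termination_by list.length
decreasing_by
  have := pvA_pass_inr_length nodes list [] tmp' h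
  simp at this; omega

-- ===== PORT B =====
def rem_nodes_from_nlist_alt (list : List (List Int)) (nodes : List Int) : List (List Int) :=
  list.foldl (fun result sub =>
    let filtered := sub.filter (fun x => decide (x ∉ nodes))
    if filtered = [] then result else result ++ [filtered]) []

-- ===== PRECONDITION & SPEC =====
def Spec_rem_nodes_from_nlist (list : List (List Int)) (nodes : List Int) (out : List (List Int)) : Prop := out = rem_nodes_from_nlist_alt list nodes
instance (list : List (List Int)) (nodes : List Int) (out : List (List Int)) : Decidable (Spec_rem_nodes_from_nlist list nodes out) := by unfold Spec_rem_nodes_from_nlist; infer_instance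

-- ===== CLAIM (what is proved, stated in full; the proofs are below) =====
def Claim_equal_rem_nodes_from_nlist : Prop := ∀ (list : List (List Int)) (nodes : List Int), Dom_rem_nodes_from_nlist list nodes → Spec_rem_nodes_from_nlist list nodes (rem_nodes_from_nlist list nodes)

-- ===== LEMMAS AND PROOFS =====

-- B as a filterMap (proof-side view of the foldl)
def pvFlt (nodes : List Int) (s : List Int) : List Int := s.filter (fun x => decide (x ∉ nodes))

def pvB (nodes : List Int) (l : List (List Int)) : List (List Int) :=
  l.filterMap (fun s => if pvFlt nodes s = [] then none else some (pvFlt nodes s))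

theorem pvB_alt_gen (nodes : List Int) :
    ∀ (l : List (List Int)) (init : List (List Int)),
      l.foldl (fun result sub =>
        let filtered := sub.filter (fun x => decide (x ∉ nodes))
        if filtered = [] then result else result ++ [filtered]) init
      = init ++ pvB nodes l := by
  intro l
  induction l with
  | nil => intro init; simp [pvB]
  | cons s rest ih =>
      intro init
      simp only [List.foldl_cons]
      by_cases h : s.filter (fun x => decide (x ∉ nodes)) = []
      · rw [if_pos h, ih]
        unfold pvB
        rw [List.filterMap_cons, if_pos (show pvFlt nodes s = [] from h)]
      · rw [if_neg h, ih]
        unfold pvB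
        rw [List.filterMap_cons, if_neg (show ¬ pvFlt nodes s = [] from h)]
        simp [pvFlt]

theorem pvB_alt (list : List (List Int)) (nodes : List Int) :
    rem_nodes_from_nlist_alt list nodes = pvB nodes list := by
  unfold rem_nodes_from_nlist_alt
  rw [pvB_alt_gen]
  simp

-- the inner removal loop is filtering
theorem pvA_inner_filter (nodes : List Int) :
    ∀ (q pf : List Int), (∀ y ∈ pf, y ∉ nodes) →
      q.foldl (fun tmpi x =>
        if x ∈ nodes ∧ x ∈ tmpi then (PySem.List.remove? tmpi x).getD tmpi else tmpi) (pf ++ q)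
      = pf ++ pvFlt nodes q := by
  intro q
  induction q with
  | nil => intro pf _; simp [pvFlt]
  | cons x q ih =>
      intro pf hpf
      simp only [List.foldl_cons]
      by_cases hx : x ∈ nodes
      · have hmem : x ∈ pf ++ x :: q := by simp
        have hnpf : x ∉ pf := fun hc => hpf x hc hx
        rw [if_pos (And.intro hx hmem), PySem.List.remove?_eq_some_erase _ _ hmem,
          Option.getD_some, List.erase_append_right _ hnpf, List.erase_cons_head]
        rw [ih pf hpf]
        simp [pvFlt, hx]
      · rw [if_neg (by tauto)]
        have hpf' : ∀ y ∈ pf ++ [x], y ∉ nodes := by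
          intro y hy
          rcases List.mem_append.1 hy with h | h
          · exact hpf y h
          · have : y = x := by simpa using h
            subst this; exact hx
        have hre : pf ++ x :: q = (pf ++ [x]) ++ q := by simp
        rw [hre, ih (pf ++ [x]) hpf']
        simp [pvFlt, hx]

theorem pvA_inner_eq (s nodes : List Int) : pvA_inner s nodes = pvFlt nodes s := by
  have := pvA_inner_filter nodes s [] (by simp)
  simpa [pvA_inner] using this

-- characterisation of one outer pass
theorem pvA_pass_char (nodes : List Int) :
    ∀ (rest acc : List (List Int)), ([] : List Int) ∉ acc →
      (pvA_pass nodes acc rest = Sum.inl (acc ++ rest.map (pvFlt nodes)) ∧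
        ∀ s ∈ rest, pvFlt nodes s ≠ []) ∨
      (∃ p e q, rest = p ++ e :: q ∧ (∀ s ∈ p, pvFlt nodes s ≠ []) ∧ pvFlt nodes e = [] ∧
        pvA_pass nodes acc rest = Sum.inr (acc ++ p.map (pvFlt nodes) ++ q)) := by
  intro rest
  induction rest with
  | nil => intro acc _; left; simp [pvA_pass]
  | cons s rest ih =>
      intro acc hacc
      by_cases he : pvFlt nodes s = []
      · right
        refine ⟨[], s, rest, by simp, by simp, he, ?_⟩
        simp only [pvA_pass, pvA_inner_eq, if_pos he]
        have hmem : ([] : List Int) ∈ acc ++ ([] : List Int) :: rest := by simp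
        rw [he, PySem.List.remove?_eq_some_erase _ _ hmem, Option.getD_some,
          List.erase_append_right _ hacc, List.erase_cons_head]
        simp
      · have step : pvA_pass nodes acc (s :: rest)
            = pvA_pass nodes (acc ++ [pvA_inner s nodes]) rest := by
          simp only [pvA_pass]
          rw [if_neg (by rw [pvA_inner_eq]; exact he)]
        have hacc' : ([] : List Int) ∉ acc ++ [pvA_inner s nodes] := by
          intro hc
          rcases List.mem_append.1 hc with hc | hc
          · exact hacc hc
          · have h0 : ([] : List Int) = pvA_inner s nodes := by simpa using hc
            rw [pvA_inner_eq] at h0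
            exact he h0.symm
        rcases ih (acc ++ [pvA_inner s nodes]) hacc' with ⟨h1, h2⟩ | ⟨p, e, q, hr, hp, hee, hpass⟩
        · left
          constructor
          · rw [step, h1]; simp [pvA_inner_eq]
          · intro t ht
            rcases List.mem_cons.1 ht with h | h
            · subst h; exact he
            · exact h2 t h
        · right
          refine ⟨s :: p, e, q, by simp [hr], ?_, hee, ?_⟩
          · intro t ht
            rcases List.mem_cons.1 ht with h | h
            · subst h; exact he
            · exact hp t h
          · rw [step, hpass]; simp [pvA_inner_eq]

theorem pvFlt_idem (nodes : List Int) (s : List Int) : pvFlt nodes (pvFlt nodes s) = pvFlt nodes s := by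
  simp [pvFlt, List.filter_filter]

theorem pvB_all_nonempty (nodes : List Int) (l : List (List Int))
    (h : ∀ s ∈ l, pvFlt nodes s ≠ []) : pvB nodes l = l.map (pvFlt nodes) := by
  induction l with
  | nil => rfl
  | cons s rest ih =>
      simp only [pvB, List.filterMap_cons, List.map_cons]
      rw [if_neg (h s (by simp))]
      have := ih (fun t ht => h t (by simp [ht]))
      simp [pvB] at this
      simp [this]

theorem pvB_fixed (nodes : List Int) (l : List (List Int))
    (h : ∀ s ∈ l, pvFlt nodes s ≠ []) : pvB nodes (l.map (pvFlt nodes)) = l.map (pvFlt nodes) := by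
  have hne : ∀ s ∈ l.map (pvFlt nodes), pvFlt nodes s ≠ [] := by
    intro s hs
    rcases List.mem_map.1 hs with ⟨t, ht, rfl⟩
    rw [pvFlt_idem]; exact h t ht
  rw [pvB_all_nonempty nodes _ hne, List.map_map]
  congr 1
  funext s
  exact pvFlt_idem nodes s

theorem pvMain (nodes : List Int) :
    ∀ (l : List (List Int)), rem_nodes_from_nlist l nodes = pvB nodes l := by
  intro l
  induction hn : l.length using Nat.strong_induction_on generalizing l with
  | _ n ih =>
  subst hn
  rcases pvA_pass_char nodes l [] (by simp) with ⟨h1, h2⟩ | ⟨p, e, q, hr, hp, he, hpass⟩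
  · unfold rem_nodes_from_nlist
    rw [h1]
    simp only [List.nil_append]
    exact (pvB_all_nonempty nodes l h2).symm
  · unfold rem_nodes_from_nlist
    rw [hpass]
    simp only [List.nil_append]
    have hlen : (p.map (pvFlt nodes) ++ q).length < l.length := by
      subst hr; simp
    rw [ih _ hlen _ rfl]
    subst hr
    simp only [pvB, List.filterMap_append, List.filterMap_cons]
    rw [if_pos he]
    have h1 : List.filterMap (fun s => if pvFlt nodes s = [] then none else some (pvFlt nodes s)) (p.map (pvFlt nodes)) = p.map (pvFlt nodes) := by
      have := pvB_fixed nodes p hp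
      simpa [pvB] using this
    have h2 : List.filterMap (fun s => if pvFlt nodes s = [] then none else some (pvFlt nodes s)) p = p.map (pvFlt nodes) := by
      have := pvB_all_nonempty nodes p hp
      simpa [pvB] using this
    simp [h1, h2]

-- ===== VERDICT (by name: the statement is the Claim_ definition above) =====
theorem rem_nodes_from_nlist_spec : Claim_equal_rem_nodes_from_nlist := by
  intro l nodes _
  unfold Spec_rem_nodes_from_nlist
  rw [pvB_alt, pvMain]
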